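-- pv_equiv track=rewrite | github.com/wyk18703232953/myResearch | codeComplex/demo/filteredData/python/logn/results_python_logn_0044/python_logn_0044.py | solve
-- ===== SOURCE A (Python) =====
-- def mask(n1):
--     arr = []
--     for _ in range(64):
--         arr.append(n1 & 1)
--         n1 >>= 1
--     arr.reverse()
--     return arr
--
-- def getn(mask_arr):
--     if sum(mask_arr) == 0:
--         return 0
--     res = 0
--     for i in range(63, -1, -1):
--         res += (2 * mask_arr[i]) ** (63 - i)
--     return res
--
-- def solve(n1, n2):
--     m1 = mask(n1)
--     m2 = mask(n2)
--
--     sol = [0 for _ in range(64)]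
--
--     for i in range(64):
--         if m1[i] != m2[i]:
--             sol[i] = 1
--             break
--
--     i += 1
--     for j in range(i, 64):
--         sol[j] = 1
--
--     res = getn(sol)
--     return res
-- ===== SOURCE B (Python) =====
-- def solve(n1, n2):
--     x = (n1 ^ n2) & ((1 << 64) - 1)
--     return (1 << x.bit_length()) - 1
-- ===== Notes on version B (the rewrite author's own statement) =====
-- stated objective: simpler
-- what changed: Replaces the three 64-entry bit arrays, the MSB-first differing-bit scan and the exponent-sum reconstruction with one closed-form expression: mask the xor to 64 bits and return (1 << bit_length) - 1.
import Mathlib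
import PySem

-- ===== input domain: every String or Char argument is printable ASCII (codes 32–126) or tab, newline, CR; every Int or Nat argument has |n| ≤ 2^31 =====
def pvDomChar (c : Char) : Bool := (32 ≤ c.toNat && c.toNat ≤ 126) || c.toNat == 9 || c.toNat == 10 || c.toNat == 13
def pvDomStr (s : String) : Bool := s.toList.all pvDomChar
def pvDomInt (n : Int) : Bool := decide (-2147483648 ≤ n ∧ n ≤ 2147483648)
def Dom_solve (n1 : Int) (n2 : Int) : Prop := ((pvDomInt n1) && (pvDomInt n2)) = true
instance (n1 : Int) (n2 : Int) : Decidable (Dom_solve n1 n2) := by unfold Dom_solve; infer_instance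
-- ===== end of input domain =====

-- B replaces A's three 64-entry bit arrays, differing-bit scan and exponent-sum rebuild by the
-- closed form ((n1^n2) & (2^64-1)).bit_length(), returning (1 << bl) - 1 (objective: simpler).

-- ===== PORT A =====
-- mask(n1): 64 times append n & 1 then n >>= 1; finally reverse
def maskLoop (n : Int) : Nat → List Int
  | 0 => []
  | Nat.succ k => PySem.Int.band n 1 :: maskLoop (n >>> (1 : Nat)) k

def maskA (n : Int) : List Int := (maskLoop n 64).reverse

-- getn(mask_arr): if sum == 0 return 0 else sum over i = 63..0 of (2*mask_arr[i])**(63-i)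
-- (indices are always in range here, so pyGetD with default 0 is exact)
def getnA (sol : List Int) : Int :=
  if sol.sum = 0 then 0
  else (List.range 64).reverse.foldl
    (fun (res : Int) (i : Nat) => res + (2 * PySem.List.pyGetD sol (i : Int) 0) ^ (63 - i)) 0

-- the first for-loop of solve: returns (final value of i, whether the break fired)
def findDiff (m1 m2 : List Int) (i : Nat) : Nat × Bool :=
  if _h : i < 64 then
    if PySem.List.pyGetD m1 (i : Int) 0 ≠ PySem.List.pyGetD m2 (i : Int) 0 then (i, true)
    else findDiff m1 m2 (i + 1)
  else (63, false)
termination_by 64 - i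

def solve (n1 : Int) (n2 : Int) : Int :=
  let m1 := maskA n1
  let m2 := maskA n2
  let sol0 : List Int := List.replicate 64 0
  let fb := findDiff m1 m2 0
  let sol1 := if fb.2 then sol0.set fb.1 1 else sol0
  let i := fb.1 + 1
  let sol2 := (List.range' i (64 - i)).foldl (fun l j => l.set j 1) sol1
  getnA sol2

-- ===== PORT B =====
def solve_alt (n1 : Int) (n2 : Int) : Int :=
  let x := PySem.Int.band (PySem.Int.bxor n1 n2) ((1 : Int) <<< (64 : Nat) - 1)
  ((1 : Int) <<< PySem.Int.bitLength x) - 1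

-- ===== PRECONDITION & SPEC =====
def Spec_solve (n1 : Int) (n2 : Int) (out : Int) : Prop := out = solve_alt n1 n2
instance (n1 : Int) (n2 : Int) (out : Int) : Decidable (Spec_solve n1 n2 out) := by unfold Spec_solve; infer_instance

-- ===== CLAIM (what is proved, stated in full; the proofs are below) =====
def Claim_equal_solve : Prop := ∀ (n1 : Int) (n2 : Int), Dom_solve n1 n2 → Spec_solve n1 n2 (solve n1 n2)

-- ===== LEMMAS AND PROOFS =====

-- Python's bit j of an integer (two's complement): ((n >> j) % 2) == 1
def pybit (n : Int) (j : Nat) : Bool := decide (PySem.Int.mod (n >>> j) 2 = 1)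

-- (n >> j) & 1, with the shift count a Nat
def bitOf (n : Int) (j : Nat) : Int := PySem.Int.band (n >>> j) 1

lemma int_shiftRight_natCast (k j : Nat) : ((k : Int) >>> j) = ((k >>> j : Nat) : Int) :=
  (Int.natCast_shiftRight k j).symm

lemma int_shiftRight_negSucc (m j : Nat) :
    ((-(m : Int) - 1) >>> j) = -((m >>> j : Nat) : Int) - 1 := by
  rw [Int.shiftRight_eq_div_pow, Nat.shiftRight_eq_div_pow]
  have h2 : (0 : Int) < ((2 ^ j : Nat) : Int) := by positivity
  have hm : (m : Int) = ((2 ^ j : Nat) : Int) * ((m / 2 ^ j : Nat) : Int) + ((m % 2 ^ j : Nat) : Int) := by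
    exact_mod_cast (Nat.div_add_mod m (2 ^ j)).symm
  have hr2 : ((m % 2 ^ j : Nat) : Int) < ((2 ^ j : Nat) : Int) := by
    exact_mod_cast Nat.mod_lt _ (by positivity)
  have key : (-(m : Int) - 1)
      = (((2 ^ j : Nat) : Int) - 1 - ((m % 2 ^ j : Nat) : Int))
        + (-((m / 2 ^ j : Nat) : Int) - 1) * ((2 ^ j : Nat) : Int) := by
    rw [hm]; ring
  rw [key, Int.add_mul_ediv_right _ _ (by omega : ((2 ^ j : Nat) : Int) ≠ 0),
    Int.ediv_eq_zero_of_lt (by omega) (by omega)]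
  omega

lemma pybit_natCast (k j : Nat) : pybit (k : Int) j = k.testBit j := by
  rw [pybit, int_shiftRight_natCast, Nat.shiftRight_eq_div_pow,
    show (2 : Int) = ((2 : Nat) : Int) from rfl, PySem.Int.mod_natCast,
    Nat.testBit_eq_decide_div_mod_eq]
  exact decide_eq_decide.mpr (by omega)

lemma pybit_negSucc (m j : Nat) : pybit (-(m : Int) - 1) j = ! m.testBit j := by
  rw [pybit, int_shiftRight_negSucc, Nat.testBit_eq_decide_div_mod_eq,
    Nat.shiftRight_eq_div_pow, PySem.Int.mod_eq_emod_of_pos (by norm_num)]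
  by_cases hb : m / 2 ^ j % 2 = 1
  · simp only [hb, decide_true, Bool.not_true]
    exact decide_eq_false (by omega)
  · simp only [hb, decide_false, Bool.not_false]
    exact decide_eq_true (by omega)

lemma bxor_nn (p q : Nat) : PySem.Int.bxor (p : Int) (q : Int) = ((p ^^^ q : Nat) : Int) := by
  simp only [PySem.Int.bxor]
  rw [if_pos (Int.natCast_nonneg p), if_pos (Int.natCast_nonneg q),
    Int.toNat_natCast, Int.toNat_natCast]

lemma bxor_pn (p q : Nat) :
    PySem.Int.bxor (p : Int) (-(q : Int) - 1) = -((p ^^^ q : Nat) : Int) - 1 := by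
  simp only [PySem.Int.bxor]
  rw [if_pos (Int.natCast_nonneg p), if_neg (by omega : ¬ (0 : Int) ≤ -(q : Int) - 1),
    Int.toNat_natCast, show (-(-(q : Int) - 1) - 1).toNat = q by omega]

lemma bxor_np (p q : Nat) :
    PySem.Int.bxor (-(p : Int) - 1) (q : Int) = -((p ^^^ q : Nat) : Int) - 1 := by
  simp only [PySem.Int.bxor]
  rw [if_neg (by omega : ¬ (0 : Int) ≤ -(p : Int) - 1), if_pos (Int.natCast_nonneg q),
    Int.toNat_natCast, show (-(-(p : Int) - 1) - 1).toNat = p by omega]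

lemma bxor_nnn (p q : Nat) :
    PySem.Int.bxor (-(p : Int) - 1) (-(q : Int) - 1) = ((p ^^^ q : Nat) : Int) := by
  simp only [PySem.Int.bxor]
  rw [if_neg (by omega : ¬ (0 : Int) ≤ -(p : Int) - 1),
    if_neg (by omega : ¬ (0 : Int) ≤ -(q : Int) - 1),
    show (-(-(p : Int) - 1) - 1).toNat = p by omega,
    show (-(-(q : Int) - 1) - 1).toNat = q by omega]

lemma pybit_bxor (a b : Int) (j : Nat) :
    pybit (PySem.Int.bxor a b) j = (pybit a j != pybit b j) := by
  rcases le_or_gt 0 a with ha | ha <;> rcases le_or_gt 0 b with hb | hb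
  · rw [show a = ((a.toNat : Nat) : Int) by omega, show b = ((b.toNat : Nat) : Int) by omega,
      bxor_nn, pybit_natCast, pybit_natCast, pybit_natCast, Nat.testBit_xor]
  · rw [show a = ((a.toNat : Nat) : Int) by omega,
      show b = (-(((-b - 1).toNat : Nat) : Int) - 1) by omega,
      bxor_pn, pybit_natCast, pybit_negSucc, pybit_negSucc, Nat.testBit_xor]
    cases a.toNat.testBit j <;> cases ((-b - 1).toNat).testBit j <;> rfl
  · rw [show a = (-(((-a - 1).toNat : Nat) : Int) - 1) by omega,
      show b = ((b.toNat : Nat) : Int) by omega,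
      bxor_np, pybit_negSucc, pybit_negSucc, pybit_natCast, Nat.testBit_xor]
    cases ((-a - 1).toNat).testBit j <;> cases b.toNat.testBit j <;> rfl
  · rw [show a = (-(((-a - 1).toNat : Nat) : Int) - 1) by omega,
      show b = (-(((-b - 1).toNat : Nat) : Int) - 1) by omega,
      bxor_nnn, pybit_natCast, pybit_negSucc, pybit_negSucc, Nat.testBit_xor]
    cases ((-a - 1).toNat).testBit j <;> cases ((-b - 1).toNat).testBit j <;> rfl

-- bitwise complement within n bits, as a subtraction
lemma testBit_compl (n : Nat) : ∀ (r j : Nat), r < 2 ^ n →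
    (2 ^ n - 1 - r).testBit j = (decide (j < n) && ! r.testBit j) := by
  induction n with
  | zero => intro r j h; interval_cases r; simp
  | succ n ih =>
    intro r j h
    have hp : 0 < 2 ^ n := Nat.two_pow_pos n
    have he : (2 : Nat) ^ (n + 1) = 2 * 2 ^ n := by ring
    cases j with
    | zero =>
      rw [Nat.testBit_zero, Nat.testBit_zero]
      by_cases hr : r % 2 = 1 <;> simp [hr] <;> omega
    | succ j =>
      rw [Nat.testBit_succ, Nat.testBit_succ]
      have h2 : (2 ^ (n + 1) - 1 - r) / 2 = 2 ^ n - 1 - r / 2 := by omega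
      rw [h2, ih (r / 2) j (by omega)]
      simp

-- the 64-bit-masked value: a natural number whose bits are Python's bits 0..63 of x
lemma X_repr (x : Int) : ∃ u : Nat,
    PySem.Int.band x ((1 : Int) <<< (64 : Nat) - 1) = (u : Int) ∧ u < 2 ^ 64 ∧
    ∀ j, u.testBit j = (decide (j < 64) && pybit x j) := by
  have hm : ((1 : Int) <<< (64 : Nat) - 1) = ((2 ^ 64 - 1 : Nat) : Int) := by decide
  rcases le_or_gt 0 x with hx | hx
  · obtain ⟨p, rfl⟩ := Int.eq_ofNat_of_zero_le hx
    refine ⟨p % 2 ^ 64, ?_, Nat.mod_lt _ (by positivity), ?_⟩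
    · rw [hm, PySem.Int.band_natCast, Nat.and_two_pow_sub_one_eq_mod]
    · intro j
      rw [Nat.testBit_mod_two_pow, pybit_natCast]
  · have hxm : x = -(((-x - 1).toNat : Nat) : Int) - 1 := by omega
    refine ⟨2 ^ 64 - 1 - (-x - 1).toNat % 2 ^ 64, ?_, by omega, ?_⟩
    · simp only [PySem.Int.band]
      rw [if_neg (by omega : ¬ (0 : Int) ≤ x), hm, if_pos (Int.natCast_nonneg _),
        Int.toNat_natCast, Nat.and_comm, Nat.and_two_pow_sub_one_eq_mod]
    · intro j
      rw [testBit_compl 64 ((-x - 1).toNat % 2 ^ 64) j (Nat.mod_lt _ (by positivity)),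
        Nat.testBit_mod_two_pow, hxm, pybit_negSucc,
        show ((-(-(((-x - 1).toNat : Nat) : Int) - 1) - 1).toNat) = (-x - 1).toNat by omega]
      cases hj : decide (j < 64) <;> simp

-- ---------- mask characterisation ----------

lemma maskLoop_eq (k : Nat) : ∀ n : Int,
    maskLoop n k = (List.range k).map (fun j => bitOf n j) := by
  induction k with
  | zero => intro n; rfl
  | succ k ih =>
    intro n
    show PySem.Int.band n 1 :: maskLoop (n >>> (1 : Nat)) k = _
    rw [List.range_succ_eq_map, List.map_cons, List.map_map, ih]
    congr 1
    · show PySem.Int.band n 1 = PySem.Int.band (n >>> (0 : Nat)) 1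
      norm_num
    · apply List.map_congr_left
      intro j _
      simp only [Function.comp_apply]
      show PySem.Int.band ((n >>> (1 : Nat)) >>> j) 1 = PySem.Int.band (n >>> (Nat.succ j)) 1
      rw [show Nat.succ j = 1 + j by omega, Int.shiftRight_add]

lemma maskA_get (n : Int) (k : Nat) (h : k < 64) :
    PySem.List.pyGetD (maskA n) (k : Int) 0 = PySem.Int.mod (n >>> (63 - k)) 2 := by
  rw [PySem.List.pyGetD_natCast, maskA, maskLoop_eq,
    List.getD_eq_getElem _ _ (by simpa using h)]
  rw [List.getElem_reverse, List.getElem_map, List.getElem_range, bitOf, PySem.Int.band_one]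
  norm_num

-- ---------- findDiff characterisation ----------

lemma findDiff_none (m1 m2 : List Int) :
    ∀ (t i : Nat), 64 - i ≤ t →
    (∀ k, i ≤ k → k < 64 → PySem.List.pyGetD m1 (k : Int) 0 = PySem.List.pyGetD m2 (k : Int) 0) →
    findDiff m1 m2 i = (63, false) := by
  intro t
  induction t with
  | zero =>
    intro i ht _
    rw [findDiff, dif_neg (by omega : ¬ i < 64)]
  | succ t ih =>
    intro i ht hall
    rw [findDiff]
    by_cases hi : i < 64
    · rw [dif_pos hi, if_neg (by simpa using hall i (le_refl i) hi)]
      exact ih (i + 1) (by omega) (fun k hk1 hk2 => hall k (by omega) hk2)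
    · rw [dif_neg hi]

lemma findDiff_first (m1 m2 : List Int) (k0 : Nat) (hk : k0 < 64)
    (hd : PySem.List.pyGetD m1 (k0 : Int) 0 ≠ PySem.List.pyGetD m2 (k0 : Int) 0) :
    ∀ (t i : Nat), k0 - i ≤ t → i ≤ k0 →
    (∀ k, i ≤ k → k < k0 → PySem.List.pyGetD m1 (k : Int) 0 = PySem.List.pyGetD m2 (k : Int) 0) →
    findDiff m1 m2 i = (k0, true) := by
  intro t
  induction t with
  | zero =>
    intro i ht hik _
    have hi : i = k0 := by omega
    subst hi
    rw [findDiff, dif_pos hk, if_pos hd]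
  | succ t ih =>
    intro i ht hik hmin
    by_cases hik0 : i = k0
    · subst hik0
      rw [findDiff, dif_pos hk, if_pos hd]
    · rw [findDiff, dif_pos (by omega : i < 64),
        if_neg (by simpa using hmin i (le_refl i) (by omega))]
      exact ih (i + 1) (by omega) (by omega) (fun k hk1 hk2 => hmin k (by omega) hk2)

-- ---------- the second loop (sol[j] = 1 for j in range(i, 64)) ----------

lemma foldl_set_length (c : Nat) : ∀ (i : Nat) (s : List Int),
    ((List.range' i c).foldl (fun l t => l.set t 1) s).length = s.length := by
  induction c with
  | zero => intro i s; rfl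
  | succ c ih =>
    intro i s
    rw [List.range'_succ, List.foldl_cons, ih, List.length_set]

lemma foldl_set_getElem (c : Nat) : ∀ (i : Nat) (s : List Int) (j : Nat)
    (hj : j < ((List.range' i c).foldl (fun l t => l.set t 1) s).length),
    ((List.range' i c).foldl (fun l t => l.set t 1) s)[j] =
      if i ≤ j ∧ j < i + c then 1 else s[j]'(by rwa [foldl_set_length] at hj) := by
  induction c with
  | zero =>
    intro i s j hj
    simp only [List.range'_zero, List.foldl_nil] at hj ⊢
    rw [if_neg (by omega)]
  | succ c ih =>
    intro i s j hj
    simp only [List.range'_succ, List.foldl_cons] at hj ⊢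
    rw [ih _ _ _ hj]
    by_cases h1 : i + 1 ≤ j ∧ j < i + 1 + c
    · rw [if_pos h1, if_pos (by omega)]
    · rw [if_neg h1, List.getElem_set]
      by_cases h2 : i = j
      · rw [if_pos h2, if_pos (by omega)]
      · rw [if_neg h2, if_neg (by omega)]

-- ---------- getn on the final sol ----------

lemma geom2 (t : Nat) : ∑ i ∈ Finset.range t, (2 : Int) ^ i = 2 ^ t - 1 := by
  induction t with
  | zero => simp
  | succ t ih => rw [Finset.sum_range_succ, ih, pow_succ]; ring

lemma sum_map_range_eq (n : Nat) (f : Nat → Int) :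
    ((List.range n).map f).sum = ∑ j ∈ Finset.range n, f j := by
  induction n with
  | zero => simp
  | succ n ih =>
    rw [List.range_succ, List.map_append, List.sum_append, Finset.sum_range_succ, ih]
    simp

lemma getnA_closed (k0 : Nat) (hk : k0 < 64) :
    getnA ((List.range 64).map (fun j => if k0 ≤ j then (1 : Int) else 0)) =
      2 ^ (64 - k0) - 1 := by
  have hget : ∀ i : Nat, i < 64 →
      PySem.List.pyGetD ((List.range 64).map (fun j => if k0 ≤ j then (1 : Int) else 0)) (i : Int) 0
        = if k0 ≤ i then (1 : Int) else 0 := by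
    intro i hi
    have hlen : i < ((List.range 64).map (fun j => if k0 ≤ j then (1 : Int) else 0)).length := by
      simpa using hi
    rw [PySem.List.pyGetD_natCast, List.getD_eq_getElem _ _ hlen,
      List.getElem_map, List.getElem_range]
  have hsum : ((List.range 64).map (fun j => if k0 ≤ j then (1 : Int) else 0)).sum ≠ 0 := by
    rw [sum_map_range_eq]
    have h1 := Finset.single_le_sum (f := fun j => if k0 ≤ j then (1 : Int) else 0)
      (s := Finset.range 64)
      (fun i _ => by
        show (0 : Int) ≤ if k0 ≤ i then 1 else 0
        by_cases h : k0 ≤ i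
        · rw [if_pos h]; norm_num
        · rw [if_neg h])
      (a := 63) (Finset.mem_range.mpr (by norm_num))
    have h1' : (if k0 ≤ 63 then (1 : Int) else 0) ≤
        ∑ j ∈ Finset.range 64, (if k0 ≤ j then (1 : Int) else 0) := h1
    rw [if_pos (by omega : k0 ≤ 63)] at h1'
    omega
  rw [getnA, if_neg hsum, PySem.List.foldl_add, zero_add, List.map_reverse, List.sum_reverse,
    sum_map_range_eq]
  have hcong : ∑ i ∈ Finset.range 64,
      (2 * PySem.List.pyGetD ((List.range 64).map (fun j => if k0 ≤ j then (1 : Int) else 0)) (i : Int) 0) ^ ((63 - i : Nat))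
      = ∑ i ∈ Finset.range 64, (if k0 ≤ i then (2 : Int) ^ ((63 - i : Nat)) else 0) := by
    apply Finset.sum_congr rfl
    intro i hi
    rw [hget i (Finset.mem_range.mp hi)]
    by_cases h : k0 ≤ i
    · rw [if_pos h, if_pos h, mul_one]
    · rw [if_neg h, if_neg h, mul_zero]
      exact zero_pow (by omega)
  rw [hcong, ← Finset.sum_range_reflect]
  have hcong2 : ∑ j ∈ Finset.range 64,
      (if k0 ≤ 64 - 1 - j then (2 : Int) ^ ((63 - (64 - 1 - j) : Nat)) else 0)
      = ∑ j ∈ Finset.range 64, (if j ∈ Finset.range (64 - k0) then (2 : Int) ^ j else 0) := by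
    apply Finset.sum_congr rfl
    intro j hj
    have hj64 : j < 64 := Finset.mem_range.mp hj
    by_cases h : k0 ≤ 64 - 1 - j
    · rw [if_pos h, if_pos (Finset.mem_range.mpr (by omega))]
      congr 1
      omega
    · rw [if_neg h, if_neg (by rw [Finset.mem_range]; omega)]
  rw [hcong2, Finset.sum_ite_mem, Finset.range_inter_range,
    min_eq_right (by omega : 64 - k0 ≤ 64), geom2]

lemma getnA_zero : getnA (List.replicate 64 0) = 0 := by
  rw [getnA, if_pos (by simp)]

-- ---------- assembling sol2 in the broke case ----------

lemma sol2_eq (k0 : Nat) (hk : k0 < 64) :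
    (List.range' (k0 + 1) (64 - (k0 + 1))).foldl (fun l j => l.set j 1)
        ((List.replicate 64 (0 : Int)).set k0 1) =
      (List.range 64).map (fun j => if k0 ≤ j then (1 : Int) else 0) := by
  apply List.ext_getElem
  · rw [foldl_set_length, List.length_set, List.length_replicate]; simp
  · intro j hj hj'
    have hj64 : j < 64 := by
      have h := hj; rwa [foldl_set_length, List.length_set, List.length_replicate] at h
    rw [foldl_set_getElem, List.getElem_map, List.getElem_range]
    by_cases h1 : k0 + 1 ≤ j ∧ j < k0 + 1 + (64 - (k0 + 1))
    · rw [if_pos h1, if_pos (by omega)]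
    · rw [if_neg h1, List.getElem_set]
      by_cases h2 : k0 = j
      · rw [if_pos h2, if_pos (by omega)]
      · rw [if_neg h2, if_neg (by omega), List.getElem_replicate]

-- ---------- main ----------

lemma solve_eq_alt (n1 n2 : Int) : solve n1 n2 = solve_alt n1 n2 := by
  obtain ⟨u, hX, hu64, hbits⟩ := X_repr (PySem.Int.bxor n1 n2)
  have halt : solve_alt n1 n2 = 2 ^ PySem.Int.bitLength ((u : Nat) : Int) - 1 := by
    show ((1 : Int) <<< PySem.Int.bitLength (PySem.Int.band (PySem.Int.bxor n1 n2) ((1 : Int) <<< (64 : Nat) - 1))) - 1 = _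
    rw [hX, Int.shiftLeft_eq, one_mul]
  have hd : ∀ k : Nat, k < 64 →
      ((PySem.List.pyGetD (maskA n1) (k : Int) 0 ≠ PySem.List.pyGetD (maskA n2) (k : Int) 0) ↔
        u.testBit (63 - k) = true) := by
    intro k hk
    rw [maskA_get n1 k hk, maskA_get n2 k hk, hbits (63 - k),
      decide_eq_true (show 63 - k < 64 by omega), Bool.true_and, pybit_bxor]
    have b1l := PySem.Int.mod_nonneg (n1 >>> (63 - k)) (show (0 : Int) < 2 by norm_num)
    have b1r := PySem.Int.mod_lt (n1 >>> (63 - k)) (show (0 : Int) < 2 by norm_num)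
    have b2l := PySem.Int.mod_nonneg (n2 >>> (63 - k)) (show (0 : Int) < 2 by norm_num)
    have b2r := PySem.Int.mod_lt (n2 >>> (63 - k)) (show (0 : Int) < 2 by norm_num)
    rw [pybit, pybit]
    by_cases h1 : PySem.Int.mod (n1 >>> (63 - k)) 2 = 1 <;>
      by_cases h2 : PySem.Int.mod (n2 >>> (63 - k)) 2 = 1 <;>
      simp [h1, h2] <;> omega
  by_cases hu : u = 0
  · subst hu
    have hfd : findDiff (maskA n1) (maskA n2) 0 = (63, false) :=
      findDiff_none _ _ 64 0 (by omega) (fun k _ hk => by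
        have h := hd k hk
        rw [Nat.zero_testBit] at h
        by_contra hne
        exact absurd (h.mp hne) (by simp))
    simp only [solve, hfd]
    norm_num [getnA_zero, halt, PySem.Int.bitLength_zero]
  · have hu' : ((u : Nat) : Int) ≠ 0 := by exact_mod_cast hu
    set L := PySem.Int.bitLength ((u : Nat) : Int) with hLdef
    have hlt : u < 2 ^ L := by
      have h := PySem.Int.lt_two_pow_bitLength ((u : Nat) : Int)
      rwa [Int.natAbs_natCast] at h
    have hge : 2 ^ (L - 1) ≤ u := by
      have h := PySem.Int.two_pow_bitLength_le ((u : Nat) : Int) hu'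
      rwa [Int.natAbs_natCast] at h
    have hL1 : 1 ≤ L := by
      rcases Nat.eq_zero_or_pos L with h | h
      · rw [h, pow_zero] at hlt; omega
      · exact h
    have hL64 : L ≤ 64 := by
      by_contra h
      have hp : (2 : Nat) ^ 64 ≤ 2 ^ (L - 1) := Nat.pow_le_pow_right (by norm_num) (by omega)
      omega
    have hpow : (2 : Nat) ^ L = 2 * 2 ^ (L - 1) := by
      rw [← pow_succ']
      congr 1
      omega
    have htop : u.testBit (L - 1) = true := by
      have hdiv : u / 2 ^ (L - 1) = 1 :=
        Nat.div_eq_of_lt_le (by omega : 1 * 2 ^ (L - 1) ≤ u) (by omega : u < (1 + 1) * 2 ^ (L - 1))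
      rw [Nat.testBit_eq_decide_div_mod_eq, hdiv]
      rfl
    have hhigh : ∀ j, L ≤ j → u.testBit j = false := fun j hj =>
      Nat.testBit_lt_two_pow (lt_of_lt_of_le hlt (Nat.pow_le_pow_right (by norm_num) hj))
    have hk0lt : 64 - L < 64 := by omega
    have h63k0 : 63 - (64 - L) = L - 1 := by omega
    have hdk0 : PySem.List.pyGetD (maskA n1) ((64 - L : Nat) : Int) 0 ≠
        PySem.List.pyGetD (maskA n2) ((64 - L : Nat) : Int) 0 :=
      (hd (64 - L) hk0lt).mpr (by rw [h63k0]; exact htop)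
    have hfd : findDiff (maskA n1) (maskA n2) 0 = (64 - L, true) :=
      findDiff_first _ _ (64 - L) hk0lt hdk0 (64 - L) 0 (by omega) (by omega)
        (fun k _ hklt => by
          have h := hd k (by omega)
          by_contra hne
          have htb := h.mp hne
          rw [hhigh (63 - k) (by omega)] at htb
          exact absurd htb (by simp))
    simp only [solve, hfd]
    rw [if_pos trivial]
    show getnA ((List.range' ((64 - L) + 1) (64 - ((64 - L) + 1))).foldl (fun l j => l.set j 1)
      ((List.replicate 64 (0 : Int)).set (64 - L) 1)) = _
    rw [sol2_eq (64 - L) hk0lt, getnA_closed (64 - L) hk0lt, halt,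
      show 64 - (64 - L) = L by omega]

-- ===== VERDICT (by name: the statement is the Claim_ definition above) =====
theorem solve_spec : Claim_equal_solve := by
  intro n1 n2 _
  unfold Spec_solve
  exact solve_eq_alt n1 n2
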